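-- pv_equiv track=rewrite | github.com/unboxing96/ALGO | 프로그래머스/unrated/159994. 카드 뭉치/카드 뭉치.py | solution
-- ===== SOURCE A (Python) =====
-- def solution(cards1, cards2, goal):
--     idx1 = 0  # cards1의 현재 index
--     idx2 = 0  # cards2의 현재 index
--     for word in goal:
--         # 카드 뭉치에서 다음 카드를 사용할 수 있는지 확인
--         can_use1 = idx1 < len(cards1) and cards1[idx1] == word
--         can_use2 = idx2 < len(cards2) and cards2[idx2] == word
--
--         # 두 카드 뭉치에서 모두 사용할 수 없는 경우, "No"를 return
--         if not can_use1 and not can_use2: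
--             return "No"
--
--         # 둘 중 하나만 사용할 수 있는 경우, 해당 카드 뭉치에서 카드를 사용
--         elif can_use1 and not can_use2:
--             idx1 += 1
--         elif can_use2 and not can_use1:
--             idx2 += 1
--         # 두 카드 뭉치에서 모두 사용할 수 있는 경우, 첫 번째 카드 뭉치에서 카드를 사용
--         else:
--             idx1 += 1
--
--     return "Yes"
-- ===== SOURCE B (Python) =====
-- def solution(cards1, cards2, goal):
--     # NFA-style frontier search: after matching goal[:k], `frontier` holds every
--     # number i of cards usable from cards1 (so k-i from cards2) that realises
--     # goal[:k] as an order-preserving interleaving of the two deck prefixes.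
--     frontier = {0}
--     for k, w in enumerate(goal):
--         nxt = set()
--         for i in frontier:
--             if i < len(cards1) and cards1[i] == w:
--                 nxt.add(i + 1)
--             j = k - i
--             if j < len(cards2) and cards2[j] == w:
--                 nxt.add(i)
--         if not nxt:
--             return "No"
--         frontier = nxt
--     return "Yes"
-- ===== Notes on version B (the rewrite author's own statement) =====
-- stated objective: alternative
-- what changed: Replaces A's committed greedy two-pointer scan with an NFA-style frontier search that, per goal position, advances the set of ALL reachable split counts (how many cards came from deck 1), so no tie-breaking choice is ever made.
-- outside the precondition, e.g. on solution(['a'], ['a', 'b'], ['a', 'b']): A returns 'No', B returns 'Yes'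
import Mathlib
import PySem

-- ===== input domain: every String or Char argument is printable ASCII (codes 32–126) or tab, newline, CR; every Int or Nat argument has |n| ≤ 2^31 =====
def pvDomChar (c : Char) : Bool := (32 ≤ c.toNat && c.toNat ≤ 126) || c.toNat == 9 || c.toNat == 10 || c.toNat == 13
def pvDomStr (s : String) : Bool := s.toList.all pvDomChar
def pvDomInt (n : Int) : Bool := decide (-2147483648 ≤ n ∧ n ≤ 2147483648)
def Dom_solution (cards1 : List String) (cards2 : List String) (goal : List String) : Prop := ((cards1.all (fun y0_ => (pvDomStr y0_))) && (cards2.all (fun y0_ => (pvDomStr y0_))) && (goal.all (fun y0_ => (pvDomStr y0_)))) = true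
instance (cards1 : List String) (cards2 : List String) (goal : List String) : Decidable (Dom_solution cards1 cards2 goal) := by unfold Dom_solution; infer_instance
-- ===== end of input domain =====

-- B replaces A's committed greedy two-pointer scan with an NFA-style frontier search over all reachable deck-split counts (alternative algorithm, no tie-break).


-- ===== PORT A =====
-- A keeps two integer cursors into the fixed decks and walks goal with an early "No" return.
def solutionLoop (cards1 : List String) (cards2 : List String) (goal : List String) (idx1 : Int) (idx2 : Int) : String :=
  match goal with
  | [] => "Yes"
  | word :: rest =>
    let can_use1 := decide (idx1 < (cards1.length : Int)) && (PySem.List.pyGet? cards1 idx1 == some word)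
    let can_use2 := decide (idx2 < (cards2.length : Int)) && (PySem.List.pyGet? cards2 idx2 == some word)
    if !can_use1 && !can_use2 then "No"
    else if can_use1 && !can_use2 then solutionLoop cards1 cards2 rest (idx1 + 1) idx2
    else if can_use2 && !can_use1 then solutionLoop cards1 cards2 rest idx1 (idx2 + 1)
    else solutionLoop cards1 cards2 rest (idx1 + 1) idx2

def solution (cards1 : List String) (cards2 : List String) (goal : List String) : String :=
  solutionLoop cards1 cards2 goal 0 0

-- ===== PORT B =====
-- B's inner `for i in frontier` loop: build the next frontier set (order-independent: only
-- its emptiness and its members are ever used).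
def altStep (cards1 : List String) (cards2 : List String) (k : Int) (w : String)
    (frontier : PySem.Set Int) : PySem.Set Int :=
  frontier.foldl (fun nxt i =>
    let nxt := if decide (i < (cards1.length : Int)) && (PySem.List.pyGet? cards1 i == some w)
               then PySem.Set.add nxt (i + 1) else nxt
    let j := k - i
    if decide (j < (cards2.length : Int)) && (PySem.List.pyGet? cards2 j == some w)
    then PySem.Set.add nxt i else nxt) PySem.Set.empty

-- B's outer `for k, w in enumerate(goal)` loop with the early "No" return.
def altLoop (cards1 : List String) (cards2 : List String) (g : List String) (k : Int)
    (frontier : PySem.Set Int) : String :=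
  match g with
  | [] => "Yes"
  | w :: rest =>
    let nxt := altStep cards1 cards2 k w frontier
    if nxt.isEmpty then "No" else altLoop cards1 cards2 rest (k + 1) nxt

def solution_alt (cards1 : List String) (cards2 : List String) (goal : List String) : String :=
  altLoop cards1 cards2 goal 0 (PySem.Set.ofList [0])

-- ===== PRECONDITION & SPEC =====
-- Pre_ excludes inputs where some word occurs in BOTH decks: there A's prefer-deck-1
-- tie-break is an accidental choice (the original problem guarantees disjoint decks) and
-- B's exhaustive frontier may legitimately answer "Yes" where A's committed greedy says "No".
def Pre_solution (cards1 : List String) (cards2 : List String) (goal : List String) : Prop :=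
  ∀ w ∈ cards1, w ∉ cards2
instance (cards1 : List String) (cards2 : List String) (goal : List String) : Decidable (Pre_solution cards1 cards2 goal) := by unfold Pre_solution; infer_instance

def pvWitness_solution : List String × List String × List String :=
  (["a", "c"], ["b"], ["a", "b", "c"])

def Spec_solution (cards1 : List String) (cards2 : List String) (goal : List String) (out : String) : Prop := out = solution_alt cards1 cards2 goal
instance (cards1 : List String) (cards2 : List String) (goal : List String) (out : String) : Decidable (Spec_solution cards1 cards2 goal out) := by unfold Spec_solution; infer_instance

-- ===== CLAIM (what is proved, stated in full; the proofs are below) =====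
def Claim_equal_solution : Prop := ∀ (cards1 : List String) (cards2 : List String) (goal : List String), Dom_solution cards1 cards2 goal → Pre_solution cards1 cards2 goal → Spec_solution cards1 cards2 goal (solution cards1 cards2 goal)

-- ===== LEMMAS AND PROOFS =====

-- A's "usable" test at cursor n equals the guard on getElem?.
theorem canUse_eq (l : List String) (n : Nat) (w : String) :
    (decide ((n : Int) < (l.length : Int)) && (PySem.List.pyGet? l (n : Int) == some w))
      = (l[n]? == some w) := by
  rw [PySem.List.pyGet?_natCast]
  by_cases hn : n < l.length
  · simp [hn]
  · simp [hn]

-- The step function on a singleton frontier {i}, written out.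
theorem altStep_singleton (c1 c2 : List String) (k i : Int) (w : String) :
    altStep c1 c2 k w (PySem.Set.ofList [i])
      = (let nxt := if decide (i < (c1.length : Int)) && (PySem.List.pyGet? c1 i == some w)
                    then PySem.Set.add PySem.Set.empty (i + 1) else PySem.Set.empty
         if decide (k - i < (c2.length : Int)) && (PySem.List.pyGet? c2 (k - i) == some w)
         then PySem.Set.add nxt i else nxt) := by
  rfl

-- Loop invariant (decks disjoint): after k = n1+n2 accepted words the frontier is
-- exactly the singleton {n1} of A's first cursor, so the two loops step in lock-step.
theorem loop_eq (c1 c2 : List String) (hd : ∀ w ∈ c1, w ∉ c2) :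
    ∀ (g : List String) (n1 n2 : Nat),
      solutionLoop c1 c2 g (n1 : Int) (n2 : Int)
        = altLoop c1 c2 g ((n1 : Int) + (n2 : Int)) (PySem.Set.ofList [(n1 : Int)]) := by
  intro g
  induction g with
  | nil => intro n1 n2; rfl
  | cons w rest ih =>
    intro n1 n2
    have hk : ((n1 : Int) + (n2 : Int)) - (n1 : Int) = (n2 : Int) := by ring
    have hstep := altStep_singleton c1 c2 ((n1 : Int) + (n2 : Int)) (n1 : Int) w
    rw [hk] at hstep
    have hne : ¬ ((c1[n1]? == some w) = true ∧ (c2[n2]? == some w) = true) := by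
      rintro ⟨h1, h2⟩
      have m1 : w ∈ c1 := List.mem_of_getElem? (by simpa using h1)
      have m2 : w ∈ c2 := List.mem_of_getElem? (by simpa using h2)
      exact hd w m1 m2
    simp only [solutionLoop, altLoop, hstep, canUse_eq c1 n1 w, canUse_eq c2 n2 w]
    cases hb1 : (c1[n1]? == some w) <;> cases hb2 : (c2[n2]? == some w)
    · simp [PySem.Set.empty]
    · -- only deck 2 usable: frontier stays {n1}, A advances idx2
      have h1 : PySem.Set.add (PySem.Set.empty (α := Int)) (n1 : Int) = [(n1 : Int)] := rfl
      have h2 : PySem.Set.ofList [(n1 : Int)] = [(n1 : Int)] := rfl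
      have hK : (n1 : Int) + (n2 : Int) + 1 = (n1 : Int) + ((n2 + 1 : Nat) : Int) := by
        push_cast; ring
      simp only [Bool.not_false, if_true, Bool.and_true, Bool.and_false, Bool.not_true]
      rw [show ((n2 : Int) + 1) = ((n2 + 1 : Nat) : Int) by push_cast; ring, ih n1 (n2 + 1)]
      simp [h2, hK]
    · -- only deck 1 usable: frontier becomes {n1+1}, A advances idx1
      have h1 : PySem.Set.add (PySem.Set.empty (α := Int)) ((n1 : Int) + 1) = [(n1 : Int) + 1] := rfl
      have hK : (n1 : Int) + (n2 : Int) + 1 = (((n1 + 1 : Nat) : Int)) + (n2 : Int) := by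
        push_cast; ring
      rw [show ((n1 : Int) + 1) = ((n1 + 1 : Nat) : Int) by push_cast; ring, ih (n1 + 1) n2]
      simp [hK, show ((n1 + 1 : Nat) : Int) = (n1 : Int) + 1 by push_cast; ring,
        show PySem.Set.ofList [(n1 : Int) + 1] = [(n1 : Int) + 1] from rfl]
    · exact absurd ⟨hb1, hb2⟩ hne

-- ===== VERDICT (by name: the statement is the Claim_ definition above) =====
theorem solution_spec : Claim_equal_solution := by
  intro c1 c2 g _ hpre
  unfold Spec_solution solution solution_alt
  simpa using loop_eq c1 c2 hpre g 0 0
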